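-- pv_equiv track=rewrite | github.com/felipemaion/studying_python | siddhiupgma.py | makeAlignment
-- ===== SOURCE A (Python) =====
-- def makeAlignment(pro,con,neutral):
--     seqs = list()
--     for otu in 'ABCD':
--         temp = ['A'*neutral]
--         if otu in 'AB':  temp.append('A'*pro)
--         else:            temp.append('G'*pro)
--         if otu in 'AC':  temp.append('T'*con)
--         else:            temp.append('C'*con)
--         seqs.append(''.join(temp))
--     return seqs
-- ===== SOURCE B (Python) =====
-- def makeAlignment(pro, con, neutral):
--     # Cartesian product of the two independent letter choices; no labels, no membership tests.
--     return ['A' * neutral + p * pro + c * con for p in 'AG' for c in 'TC']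
-- ===== Notes on version B (the rewrite author's own statement) =====
-- stated objective: simpler
-- what changed: Replaces the loop over labels 'ABCD' with membership tests by a direct Cartesian product over the two choice alphabets 'AG' and 'TC', building each string by concatenation.
import Mathlib
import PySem

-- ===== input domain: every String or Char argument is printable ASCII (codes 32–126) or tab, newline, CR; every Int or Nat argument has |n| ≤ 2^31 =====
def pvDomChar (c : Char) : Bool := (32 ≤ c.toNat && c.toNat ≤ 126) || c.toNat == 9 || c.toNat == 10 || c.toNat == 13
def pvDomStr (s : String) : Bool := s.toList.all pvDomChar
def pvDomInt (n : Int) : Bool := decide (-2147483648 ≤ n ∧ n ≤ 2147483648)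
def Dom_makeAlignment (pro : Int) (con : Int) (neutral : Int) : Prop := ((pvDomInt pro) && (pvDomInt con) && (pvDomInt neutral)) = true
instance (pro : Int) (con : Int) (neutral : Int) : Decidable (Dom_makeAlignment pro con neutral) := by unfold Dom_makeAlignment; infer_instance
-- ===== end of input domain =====

-- ===== PORT A =====
-- B builds the four sequences as the Cartesian product of the two letter choices; same values, plainer decomposition.
def pvRep (c : Char) (n : Int) : String := String.ofList (PySem.List.pyRepeat [c] n)

def makeAlignment (pro : Int) (con : Int) (neutral : Int) : List String :=
  ("ABCD".toList).foldl (fun seqs otu =>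
    let temp := [pvRep 'A' neutral]
    let temp := temp ++ [if otu ∈ "AB".toList then pvRep 'A' pro else pvRep 'G' pro]
    let temp := temp ++ [if otu ∈ "AC".toList then pvRep 'T' con else pvRep 'C' con]
    seqs ++ [String.join temp]) []

-- ===== PORT B =====
def makeAlignment_alt (pro : Int) (con : Int) (neutral : Int) : List String :=
  ("AG".toList).flatMap (fun p =>
    ("TC".toList).map (fun c => pvRep 'A' neutral ++ pvRep p pro ++ pvRep c con))

-- ===== PRECONDITION & SPEC =====
def Spec_makeAlignment (pro : Int) (con : Int) (neutral : Int) (out : List String) : Prop := out = makeAlignment_alt pro con neutral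
instance (pro : Int) (con : Int) (neutral : Int) (out : List String) : Decidable (Spec_makeAlignment pro con neutral out) := by unfold Spec_makeAlignment; infer_instance

-- ===== CLAIM (what is proved, stated in full; the proofs are below) =====
def Claim_equal_makeAlignment : Prop := ∀ (pro : Int) (con : Int) (neutral : Int), Dom_makeAlignment pro con neutral → Spec_makeAlignment pro con neutral (makeAlignment pro con neutral)

-- ===== LEMMAS AND PROOFS =====

-- ===== VERDICT (by name: the statement is the Claim_ definition above) =====
theorem makeAlignment_spec : Claim_equal_makeAlignment := by
  intro pro con neutral _
  unfold Spec_makeAlignment makeAlignment makeAlignment_alt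
  simp [String.join, List.foldl]
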